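-- pv_equiv track=rewrite | github.com/CERA-OHM/Alien_to_Integer | Alien_to_Integer/main.py | alien_to_integer
-- ===== SOURCE A (Python) =====
-- def alien_to_integer(s):
--     symbol_values = {
--         'A': 1,
--         'B': 5,
--         'Z': 10,
--         'L': 50,
--         'C': 100,
--         'D': 500,
--         'R': 1000,
--     }
--
--     result = 0
--     prev_value = 0
--
--     for symbol in reversed(s):
--         current_value = symbol_values[symbol]
--
--         if current_value < prev_value:
--             result -= current_value
--         else:
--             result += current_value
--
--         prev_value = current_value
--
--     return result
-- ===== SOURCE B (Python) =====
-- def alien_to_integer(s):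
--     symbol_values = {
--         'A': 1,
--         'B': 5,
--         'Z': 10,
--         'L': 50,
--         'C': 100,
--         'D': 500,
--         'R': 1000,
--     }
--     values = [symbol_values[c] for c in s]
--     total = sum(values)
--     for a, b in zip(values, values[1:]):
--         if a < b:
--             total -= 2 * a
--     return total
-- ===== Notes on version B (the rewrite author's own statement) =====
-- stated objective: alternative
-- what changed: B replaces A's reversed stateful scan (prev_value accumulator) with a forward two-pass sum-then-correct: sum all symbol values once, then subtract 2*a for every adjacent pair (a,b) with a < b.
import Mathlib
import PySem

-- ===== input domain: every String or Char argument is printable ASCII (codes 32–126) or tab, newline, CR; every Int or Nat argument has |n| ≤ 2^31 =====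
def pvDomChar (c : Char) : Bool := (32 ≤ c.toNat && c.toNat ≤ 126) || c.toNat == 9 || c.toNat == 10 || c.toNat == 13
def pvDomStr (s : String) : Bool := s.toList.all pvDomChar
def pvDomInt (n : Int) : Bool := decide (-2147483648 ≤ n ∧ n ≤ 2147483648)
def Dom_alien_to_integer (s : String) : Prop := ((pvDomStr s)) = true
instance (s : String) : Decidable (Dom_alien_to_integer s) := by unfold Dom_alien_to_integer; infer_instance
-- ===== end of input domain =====

-- B replaces A's reversed stateful scan with a forward two-pass sum-then-correct; same O(n) cost, different decomposition.
-- Pre_ excludes strings containing a symbol outside the dict, where Python A (and B) raise KeyError.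

-- the symbol_values dict, shared by both Pythons
def pvSV : PySem.Dict Char Int :=
  PySem.Dict.ofList [('A', 1), ('B', 5), ('Z', 10), ('L', 50), ('C', 100), ('D', 500), ('R', 1000)]

-- ===== PORT A =====
-- symbol_values[symbol]: KeyError on missing keys, excluded by Pre_; the port uses default 0 there.
def alien_to_integer (s : String) : Int :=
  (s.toList.reverse.foldl
    (fun (st : Int × Int) (symbol : Char) =>
      let current_value := pvSV.getD symbol 0
      (if current_value < st.2 then st.1 - current_value else st.1 + current_value,
       current_value))
    (0, 0)).1

-- ===== PORT B =====
def alien_to_integer_alt (s : String) : Int :=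
  let values := s.toList.map (fun c => pvSV.getD c 0)
  let total := values.foldl (· + ·) 0
  (values.zip values.tail).foldl (fun t p => if p.1 < p.2 then t - 2 * p.1 else t) total

-- ===== PRECONDITION & SPEC =====
-- Pre_ admits exactly the strings made of the seven alien symbols; on any other char A raises KeyError (returns nothing).
def Pre_alien_to_integer (s : String) : Prop :=
  (s.toList.all (fun c => c == 'A' || c == 'B' || c == 'Z' || c == 'L' || c == 'C' || c == 'D' || c == 'R')) = true
instance (s : String) : Decidable (Pre_alien_to_integer s) := by unfold Pre_alien_to_integer; infer_instance

def pvWitness_alien_to_integer : String := "RCZAB"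

def Spec_alien_to_integer (s : String) (out : Int) : Prop := out = alien_to_integer_alt s
instance (s : String) (out : Int) : Decidable (Spec_alien_to_integer s out) := by unfold Spec_alien_to_integer; infer_instance

-- ===== CLAIM (what is proved, stated in full; the proofs are below) =====
def Claim_equal_alien_to_integer : Prop := ∀ (s : String), Dom_alien_to_integer s → Pre_alien_to_integer s → Spec_alien_to_integer s (alien_to_integer s)

-- ===== LEMMAS AND PROOFS =====

-- the common reference value on a list of symbol values
def pvG : List Int → Int
  | [] => 0
  | a :: rest => if a < rest.headD 0 then pvG rest - a else pvG rest + a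

-- total correction B subtracts
def pvC : List Int → Int
  | [] => 0
  | [_] => 0
  | a :: b :: rest => (if a < b then 2 * a else 0) + pvC (b :: rest)

theorem pvA_fold (v : List Int) :
    v.reverse.foldl
      (fun (st : Int × Int) (a : Int) =>
        (if a < st.2 then st.1 - a else st.1 + a, a)) (0, 0)
      = (pvG v, v.headD 0) := by
  induction v with
  | nil => rfl
  | cons a rest ih =>
    rw [List.reverse_cons, List.foldl_append, ih]
    simp [pvG]

theorem pvB_sum (v : List Int) (hv : ∀ x ∈ v, 0 ≤ x) (t : Int) :
    v.foldl (· + ·) t = t + pvG v + pvC v := by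
  induction v generalizing t with
  | nil => simp [pvG, pvC]
  | cons a rest ih =>
    have ha : 0 ≤ a := hv a (by simp)
    have hrest : ∀ x ∈ rest, 0 ≤ x := fun x hx => hv x (by simp [hx])
    simp only [List.foldl_cons, ih hrest]
    cases rest with
    | nil => simp only [pvG, pvC, List.headD]; split_ifs <;> omega
    | cons b r => simp only [pvG, pvC, List.headD]; split_ifs <;> omega

theorem pvB_corr (v : List Int) (t : Int) :
    (v.zip v.tail).foldl (fun t p => if p.1 < p.2 then t - 2 * p.1 else t) t
      = t - pvC v := by
  induction v generalizing t with
  | nil => simp [pvC]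
  | cons a rest ih =>
    cases rest with
    | nil => simp [pvC]
    | cons b r =>
      simp only [List.tail_cons] at ih ⊢
      simp only [List.zip_cons_cons, List.foldl_cons, ih, pvC]
      split_ifs <;> omega

theorem pvSV_nonneg (c : Char) : 0 ≤ pvSV.getD c 0 := by
  simp only [pvSV, PySem.Dict.ofList, PySem.Dict.update, List.foldl_cons, List.foldl_nil,
    PySem.Dict.getD_insert, PySem.Dict.getD_empty]
  split_ifs <;> norm_num

-- ===== VERDICT (by name: the statement is the Claim_ definition above) =====
theorem alien_to_integer_spec : Claim_equal_alien_to_integer := by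
  intro s _ _
  unfold Spec_alien_to_integer alien_to_integer alien_to_integer_alt
  set v : List Int := s.toList.map (fun c => pvSV.getD c 0) with hv
  have hmapfold :
      s.toList.reverse.foldl
        (fun (st : Int × Int) (symbol : Char) =>
          let current_value := pvSV.getD symbol 0
          (if current_value < st.2 then st.1 - current_value else st.1 + current_value,
           current_value)) (0, 0)
        = v.reverse.foldl
            (fun (st : Int × Int) (a : Int) =>
              (if a < st.2 then st.1 - a else st.1 + a, a)) (0, 0) := by
    rw [hv, ← List.map_reverse, List.foldl_map]
  have hnn : ∀ x ∈ v, 0 ≤ x := by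
    intro x hx
    rw [hv] at hx
    obtain ⟨c, _, rfl⟩ := List.mem_map.mp hx
    exact pvSV_nonneg c
  rw [hmapfold, pvA_fold, pvB_corr, pvB_sum v hnn]
  ring
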